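-- pv_equiv track=rewrite | github.com/ZhiliShen/Programmer-Code-Interview-Guide | 递归和动态规划/汉诺塔问题/test2.py | hanoi_state_without_recur
-- ===== SOURCE A (Python) =====
-- from typing import List
--
-- def hanoi_state_without_recur(arr: List[int], source: int, target: int, auxiliary: int):
--     if arr is None or len(arr) == 0:
--         return -1
--     result = 0
--     index = len(arr)-1
--     dp = [0]*len(arr)
--     last = 1
--     for i in range(len(dp)):
--         dp[i] = last
--         last = (last << 1) % 1000000007  # 提前打表
--     while index >= 0:
--         if arr[index] == auxiliary:
--             return -1
--         if arr[index] == target: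
--             result += dp[index]  # 这里是index不是i！！！
--             source, auxiliary = auxiliary, source
--         else:
--             target, auxiliary = auxiliary, target
--         index -= 1
--
--     return result % 1000000007
-- ===== SOURCE B (Python) =====
-- def hanoi_state_without_recur(arr, source, target, auxiliary):
--     if arr is None or len(arr) == 0:
--         return -1
--     v = 0
--     for d in reversed(arr):
--         if d == auxiliary:
--             return -1
--         if d == target:
--             v = 2 * v + 1
--             source, auxiliary = auxiliary, source
--         else:
--             v = 2 * v
--             target, auxiliary = auxiliary, target
--     return v % 1000000007
-- ===== Notes on version B (the rewrite author's own statement) =====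
-- stated objective: alternative
-- what changed: Dropped the precomputed dp power table and index-based while-loop; B walks reversed(arr) element-wise, accumulating the answer as an exact binary number by Horner's rule (v = 2v + bit) with a single mod at the end.
import Mathlib
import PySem

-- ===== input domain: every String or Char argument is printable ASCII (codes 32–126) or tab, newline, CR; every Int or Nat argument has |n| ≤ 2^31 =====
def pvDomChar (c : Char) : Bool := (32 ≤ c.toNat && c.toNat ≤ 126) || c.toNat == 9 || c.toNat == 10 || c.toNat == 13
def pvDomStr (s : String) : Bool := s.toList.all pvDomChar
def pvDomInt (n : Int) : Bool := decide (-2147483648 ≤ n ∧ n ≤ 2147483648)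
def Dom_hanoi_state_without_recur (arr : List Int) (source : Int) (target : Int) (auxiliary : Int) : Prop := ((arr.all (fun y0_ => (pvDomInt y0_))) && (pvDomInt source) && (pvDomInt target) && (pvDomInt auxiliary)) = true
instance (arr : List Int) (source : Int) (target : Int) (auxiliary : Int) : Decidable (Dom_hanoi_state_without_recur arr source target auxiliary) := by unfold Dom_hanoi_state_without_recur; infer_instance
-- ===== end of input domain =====

-- B drops A's precomputed power table and index-based while-loop and instead walks
-- reversed(arr) element-wise, accumulating the exact value by Horner's rule with one
-- final mod (objective: alternative decomposition, same cost).

-- ===== PORT A =====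
-- dp table: dp[i] = last, last = (last << 1) % 1000000007 ; built here front-to-back
def pvDpTable : Nat → Int → List Int
  | 0, _ => []
  | n + 1, last => last :: pvDpTable n (PySem.Int.mod (last * 2) 1000000007)

-- the while-loop: fuel = index + 1, current index = fuel - 1; arr[index]/dp[index] are
-- always in range (index < len arr), so pyGetD with default 0 is exact here
def pvLoopA (arr dp : List Int) : Nat → Int → Int → Int → Int → Int
  | 0, _, _, _, result => PySem.Int.mod result 1000000007
  | k + 1, source, target, auxiliary, result =>
    if PySem.List.pyGetD arr (k : Int) 0 = auxiliary then -1
    else if PySem.List.pyGetD arr (k : Int) 0 = target then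
      pvLoopA arr dp k auxiliary target source (result + PySem.List.pyGetD dp (k : Int) 0)
    else
      pvLoopA arr dp k source auxiliary target result

def hanoi_state_without_recur (arr : List Int) (source : Int) (target : Int) (auxiliary : Int) : Int :=
  if arr.length = 0 then -1
  else pvLoopA arr (pvDpTable arr.length 1) arr.length source target auxiliary 0

-- ===== PORT B =====
-- the for-loop over reversed(arr) with Horner accumulator v; early return -1, final v % M
def pvGoB : List Int → Int → Int → Int → Int → Int
  | [], _, _, _, v => PySem.Int.mod v 1000000007
  | d :: rest, source, target, auxiliary, v =>
    if d = auxiliary then -1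
    else if d = target then pvGoB rest auxiliary target source (2 * v + 1)
    else pvGoB rest source auxiliary target (2 * v)

def hanoi_state_without_recur_alt (arr : List Int) (source : Int) (target : Int) (auxiliary : Int) : Int :=
  if arr.length = 0 then -1
  else pvGoB arr.reverse source target auxiliary 0

-- ===== PRECONDITION & SPEC =====
def Spec_hanoi_state_without_recur (arr : List Int) (source : Int) (target : Int) (auxiliary : Int) (out : Int) : Prop := out = hanoi_state_without_recur_alt arr source target auxiliary
instance (arr : List Int) (source : Int) (target : Int) (auxiliary : Int) (out : Int) : Decidable (Spec_hanoi_state_without_recur arr source target auxiliary out) := by unfold Spec_hanoi_state_without_recur; infer_instance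

-- ===== CLAIM (what is proved, stated in full; the proofs are below) =====
def Claim_equal_hanoi_state_without_recur : Prop := ∀ (arr : List Int) (source : Int) (target : Int) (auxiliary : Int), Dom_hanoi_state_without_recur arr source target auxiliary → Spec_hanoi_state_without_recur arr source target auxiliary (hanoi_state_without_recur arr source target auxiliary)

-- ===== LEMMAS AND PROOFS =====

-- the dp table: element i (for i < n, last reduced mod M) is (last * 2^i) % M
theorem pvDpTable_getD (n : Nat) (last : Int) (i : Nat) (hi : i < n)
    (h0 : 0 ≤ last) (h1 : last < 1000000007) :
    (pvDpTable n last).getD i 0 = (last * 2 ^ i) % 1000000007 := by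
  induction n generalizing last i with
  | zero => omega
  | succ n ih =>
    cases i with
    | zero =>
      simp only [pvDpTable, List.getD_cons_zero]
      simpa using (Int.emod_eq_of_lt h0 h1).symm
    | succ i =>
      have hmod : PySem.Int.mod (last * 2) 1000000007 = (last * 2) % 1000000007 :=
        PySem.Int.mod_eq_emod_of_pos (by norm_num)
      simp only [pvDpTable, List.getD_cons_succ]
      rw [ih ((PySem.Int.mod (last * 2) 1000000007)) i (by omega)
            (by rw [hmod]; exact Int.emod_nonneg _ (by norm_num))
            (by rw [hmod]; exact Int.emod_lt_of_pos _ (by norm_num))]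
      rw [hmod, Int.mul_emod, Int.emod_emod_of_dvd _ (by norm_num), ← Int.mul_emod]
      ring_nf

-- peeling the reversed prefix: (arr.take (k+1)).reverse = arr[k] :: (arr.take k).reverse
theorem pvTake_reverse_succ (arr : List Int) (k : Nat) (hk : k < arr.length) :
    (arr.take (k + 1)).reverse = arr[k] :: (arr.take k).reverse := by
  rw [List.take_add_one, List.getElem?_eq_getElem hk]
  simp

-- main invariant: A's loop at fuel k with accumulator r equals B's Horner loop over the
-- reversed k-prefix with accumulator v, whenever r ≡ v * 2^k (mod 1000000007)
theorem pvLoop_eq (arr : List Int) (k : Nat) (hk : k ≤ arr.length) (s t a r v : Int)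
    (hrv : r % 1000000007 = (v * 2 ^ k) % 1000000007) :
    pvLoopA arr (pvDpTable arr.length 1) k s t a r = pvGoB ((arr.take k).reverse) s t a v := by
  induction k generalizing s t a r v with
  | zero =>
    simp only [pvLoopA, List.take_zero, List.reverse_nil, pvGoB]
    rw [PySem.Int.mod_eq_emod_of_pos (by norm_num), PySem.Int.mod_eq_emod_of_pos (by norm_num)]
    simpa using hrv
  | succ k ih =>
    have hklt : k < arr.length := by omega
    have hget : PySem.List.pyGetD arr (k : Int) 0 = arr[k] := by
      rw [PySem.List.pyGetD_natCast, List.getD_eq_getElem?_getD, List.getElem?_eq_getElem hklt]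
      rfl
    have hdp : PySem.List.pyGetD (pvDpTable arr.length 1) (k : Int) 0
        = (2 ^ k) % 1000000007 := by
      rw [PySem.List.pyGetD_natCast]
      rw [pvDpTable_getD arr.length 1 k (by omega) (by norm_num) (by norm_num)]
      ring_nf
    rw [pvTake_reverse_succ arr k hklt]
    simp only [pvLoopA, pvGoB, hget]
    by_cases h1 : arr[k] = a
    · rw [if_pos h1, if_pos h1]
    · rw [if_neg h1, if_neg h1]
      by_cases h2 : arr[k] = t
      · rw [if_pos h2, if_pos h2]
        refine ih (by omega) a t s _ _ ?_
        rw [hdp, Int.add_emod r, Int.emod_emod_of_dvd _ (by norm_num), ← Int.add_emod,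
            Int.add_emod r, hrv, ← Int.add_emod]
        ring_nf
      · rw [if_neg h2, if_neg h2]
        refine ih (by omega) s a t r (2 * v) ?_
        rw [hrv]
        ring_nf

-- ===== VERDICT (by name: the statement is the Claim_ definition above) =====
theorem hanoi_state_without_recur_spec : Claim_equal_hanoi_state_without_recur := by
  intro arr s t a _
  unfold Spec_hanoi_state_without_recur hanoi_state_without_recur hanoi_state_without_recur_alt
  by_cases h : arr.length = 0
  · simp [h]
  · simp only [h, if_false]
    rw [pvLoop_eq arr arr.length (le_refl _) s t a 0 0 (by simp)]
    rw [List.take_length]
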